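-- pv_equiv track=rewrite | github.com/josiahcoad/chalice_crud | chalicelib/logic.py | sub_5dollar_meal
-- ===== SOURCE A (Python) =====
-- def sub_5dollar_meal(deals):
--     food = [deal for deal in deals
--             if deal['type'] == 'food' and deal['discount_marker'] == '$']
--     drink = [deal for deal in deals
--              if deal['type'] == 'drink' and deal['discount_marker'] == '$']
--     return (len(food) > 0 and len(drink) > 0
--             and
--             (min([int(deal['discount_amount']) for deal in food])
--             + min([int(deal['discount_amount']) for deal in drink])
--             <= 5))
-- ===== SOURCE B (Python) =====
-- def sub_5dollar_meal(deals):
--     # A pair-existence check: the cheapest food + cheapest drink cost <= 5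
--     # iff SOME '$' food/drink pair sums to <= 5.
--     return any(
--         f['type'] == 'food' and f['discount_marker'] == '$'
--         and d['type'] == 'drink' and d['discount_marker'] == '$'
--         and int(f['discount_amount']) + int(d['discount_amount']) <= 5
--         for f in deals for d in deals)
-- ===== Notes on version B (the rewrite author's own statement) =====
-- stated objective: alternative
-- what changed: Instead of filtering two lists and comparing the sum of their minima to 5, B tests existence of a single qualifying pair: any '$' food deal and '$' drink deal whose amounts sum to <= 5 (correct since the minima attain the smallest pair sum).
import Mathlib
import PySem

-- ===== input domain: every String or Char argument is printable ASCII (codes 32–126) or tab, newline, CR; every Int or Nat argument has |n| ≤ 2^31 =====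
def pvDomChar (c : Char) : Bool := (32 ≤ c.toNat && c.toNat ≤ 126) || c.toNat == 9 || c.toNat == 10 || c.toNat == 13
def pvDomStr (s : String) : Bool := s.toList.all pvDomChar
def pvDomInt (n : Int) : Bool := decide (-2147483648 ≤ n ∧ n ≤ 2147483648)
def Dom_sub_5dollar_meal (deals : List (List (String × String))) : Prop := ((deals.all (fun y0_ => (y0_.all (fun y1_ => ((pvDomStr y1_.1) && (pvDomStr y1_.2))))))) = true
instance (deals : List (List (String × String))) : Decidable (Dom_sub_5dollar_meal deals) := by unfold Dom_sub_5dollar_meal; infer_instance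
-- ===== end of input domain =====

-- B replaces A's min-of-each-class comparison by a pair-existence check (some '$' food + '$' drink pair sums ≤ 5); return value only.

-- ===== PORT A =====
-- deal['k'] on the dict argument (assoc-list input, Python-dict key semantics)
def pvGet (d : List (String × String)) (k : String) : Option String :=
  (PySem.Dict.ofList d).get? k

-- int(deal['discount_amount']); under Pre_ the lookup and parse succeed whenever A evaluates it, so getD 0 is never taken
def pvAmt (d : List (String × String)) : Int :=
  ((pvGet d "discount_amount").bind PySem.Int.ofStr?).getD 0

-- the two comprehension conditions of A
def pvFoodP (d : List (String × String)) : Bool :=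
  pvGet d "type" == some "food" && pvGet d "discount_marker" == some "$"
def pvDrinkP (d : List (String × String)) : Bool :=
  pvGet d "type" == some "drink" && pvGet d "discount_marker" == some "$"

def sub_5dollar_meal (deals : List (List (String × String))) : Bool :=
  let food := deals.filter pvFoodP
  let drink := deals.filter pvDrinkP
  decide (0 < food.length) && decide (0 < drink.length) &&
    (match PySem.List.min? (food.map pvAmt) (fun x => x),
           PySem.List.min? (drink.map pvAmt) (fun x => x) with
     | some a, some b => decide (a + b ≤ 5)
     | _, _ => false)

-- ===== PORT B =====
-- deal['k'] / int(deal['discount_amount']) on B's side (same Python-dict semantics, B's own helpers)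
def pvGetB (d : List (String × String)) (k : String) : Option String :=
  (PySem.Dict.ofList d).get? k
def pvAmtB (d : List (String × String)) : Int :=
  ((pvGetB d "discount_amount").bind PySem.Int.ofStr?).getD 0

-- any(... for f in deals for d in deals) with the conjunctive condition in B's order
def sub_5dollar_meal_alt (deals : List (List (String × String))) : Bool :=
  deals.any (fun f => deals.any (fun d =>
    pvGetB f "type" == some "food" && pvGetB f "discount_marker" == some "$" &&
    pvGetB d "type" == some "drink" && pvGetB d "discount_marker" == some "$" &&
    decide (pvAmtB f + pvAmtB d ≤ 5)))

-- ===== PRECONDITION & SPEC =====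
-- Pre_ excludes exactly the inputs on which the Python A raises: a deal with no 'type' key,
-- a 'food'/'drink' deal with no 'discount_marker' key, and — only when both a '$' food deal and a
-- '$' drink deal are present, since otherwise A's `and` short-circuits before parsing — a '$'
-- food/drink deal whose 'discount_amount' is missing or not int-parsable.
def Pre_sub_5dollar_meal (deals : List (List (String × String))) : Prop :=
  (∀ d ∈ deals,
    (PySem.Dict.ofList d).get? "type" ≠ none ∧
    (((PySem.Dict.ofList d).get? "type" = some "food" ∨ (PySem.Dict.ofList d).get? "type" = some "drink") →
      (PySem.Dict.ofList d).get? "discount_marker" ≠ none)) ∧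
  ((deals.filter pvFoodP ≠ [] ∧ deals.filter pvDrinkP ≠ []) →
    ∀ d ∈ deals, (pvFoodP d ∨ pvDrinkP d) →
      (((PySem.Dict.ofList d).get? "discount_amount").bind PySem.Int.ofStr?) ≠ none)
instance (deals : List (List (String × String))) : Decidable (Pre_sub_5dollar_meal deals) := by
  unfold Pre_sub_5dollar_meal; infer_instance

def pvWitness_sub_5dollar_meal : (List (List (String × String))) :=
  [[("type", "food"), ("discount_marker", "$"), ("discount_amount", "2")],
   [("type", "drink"), ("discount_marker", "$"), ("discount_amount", "3")]]

def Spec_sub_5dollar_meal (deals : List (List (String × String))) (out : Bool) : Prop := out = sub_5dollar_meal_alt deals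
instance (deals : List (List (String × String))) (out : Bool) : Decidable (Spec_sub_5dollar_meal deals out) := by unfold Spec_sub_5dollar_meal; infer_instance

-- ===== CLAIM (what is proved, stated in full; the proofs are below) =====
def Claim_equal_sub_5dollar_meal : Prop := ∀ (deals : List (List (String × String))), Dom_sub_5dollar_meal deals → Pre_sub_5dollar_meal deals → Spec_sub_5dollar_meal deals (sub_5dollar_meal deals)

-- ===== LEMMAS AND PROOFS =====

-- B's Boolean condition, re-grouped into A's two filter predicates
theorem alt_pred (f d : List (String × String)) :
    (pvGetB f "type" == some "food" && pvGetB f "discount_marker" == some "$" &&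
     pvGetB d "type" == some "drink" && pvGetB d "discount_marker" == some "$" &&
     decide (pvAmtB f + pvAmtB d ≤ 5))
    = (pvFoodP f && pvDrinkP d && decide (pvAmt f + pvAmt d ≤ 5)) := by
  show _ = (pvGet f "type" == some "food" && pvGet f "discount_marker" == some "$" &&
            (pvGet d "type" == some "drink" && pvGet d "discount_marker" == some "$") &&
            decide (pvAmt f + pvAmt d ≤ 5))
  have h : pvGetB = pvGet := rfl
  have h2 : pvAmtB = pvAmt := rfl
  rw [h, h2]
  cases pvGet f "type" == some "food" <;>
    cases pvGet f "discount_marker" == some "$" <;>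
    cases pvGet d "type" == some "drink" <;>
    cases pvGet d "discount_marker" == some "$" <;> simp

-- existence form of B
theorem alt_iff (deals : List (List (String × String))) :
    sub_5dollar_meal_alt deals = true ↔
      ∃ f ∈ deals.filter pvFoodP, ∃ d ∈ deals.filter pvDrinkP, pvAmt f + pvAmt d ≤ 5 := by
  unfold sub_5dollar_meal_alt
  simp only [alt_pred, List.any_eq_true, Bool.and_eq_true, decide_eq_true_eq, List.mem_filter]
  constructor
  · rintro ⟨f, hf, d, hd, ⟨hfp, hdp⟩, hle⟩
    exact ⟨f, ⟨hf, hfp⟩, d, ⟨hd, hdp⟩, hle⟩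
  · rintro ⟨f, ⟨hf, hfp⟩, d, ⟨hd, hdp⟩, hle⟩
    exact ⟨f, hf, d, hd, ⟨hfp, hdp⟩, hle⟩

-- ===== VERDICT (by name: the statement is the Claim_ definition above) =====
theorem sub_5dollar_meal_spec : Claim_equal_sub_5dollar_meal := by
  intro deals _ _
  unfold Spec_sub_5dollar_meal
  unfold sub_5dollar_meal
  cases hF : PySem.List.min? ((deals.filter pvFoodP).map pvAmt) (fun x => x) with
  | none =>
    have h : (deals.filter pvFoodP).map pvAmt = [] := (PySem.List.min?_eq_none_iff _ _).mp hF
    have h2 : deals.filter pvFoodP = [] := by simpa using h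
    have hB : sub_5dollar_meal_alt deals = false := by
      rw [← Bool.not_eq_true, alt_iff]
      rintro ⟨f, hf, -⟩
      rw [h2] at hf; exact absurd hf (List.not_mem_nil)
    simp [h2, hB]
  | some a =>
    cases hD : PySem.List.min? ((deals.filter pvDrinkP).map pvAmt) (fun x => x) with
    | none =>
      have h : (deals.filter pvDrinkP).map pvAmt = [] := (PySem.List.min?_eq_none_iff _ _).mp hD
      have h2 : deals.filter pvDrinkP = [] := by simpa using h
      have hB : sub_5dollar_meal_alt deals = false := by
        rw [← Bool.not_eq_true, alt_iff]
        rintro ⟨f, -, d, hd, -⟩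
        rw [h2] at hd; exact absurd hd (List.not_mem_nil)
      simp [h2, hB]
    | some b =>
      obtain ⟨f, hf, hfa⟩ := List.mem_map.mp (PySem.List.min?_mem hF)
      obtain ⟨d, hd, hdb⟩ := List.mem_map.mp (PySem.List.min?_mem hD)
      have hF' : deals.filter pvFoodP ≠ [] := by
        intro h; rw [h] at hf; exact absurd hf (List.not_mem_nil)
      have hD' : deals.filter pvDrinkP ≠ [] := by
        intro h; rw [h] at hd; exact absurd hd (List.not_mem_nil)
      by_cases hle : a + b ≤ 5
      · have hB : sub_5dollar_meal_alt deals = true :=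
          (alt_iff deals).mpr ⟨f, hf, d, hd, by rw [hfa, hdb]; exact hle⟩
        simp [List.length_pos_iff, hF', hD', hB, hF, hD, hle]
      · have hB : sub_5dollar_meal_alt deals = false := by
          rw [← Bool.not_eq_true, alt_iff]
          rintro ⟨f', hf', d', hd', hle'⟩
          have h1 : a ≤ pvAmt f' :=
            PySem.List.min?_isMin hF _ (List.mem_map_of_mem hf')
          have h2 : b ≤ pvAmt d' :=
            PySem.List.min?_isMin hD _ (List.mem_map_of_mem hd')
          exact hle (by omega)
        simp [List.length_pos_iff, hF', hD', hB, hF, hD, hle]
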